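-- pv_equiv track=rewrite | github.com/ZhiHanZ/10601_Machine_Learning | hw3/tagger.py | preprocess_model1
-- ===== SOURCE A (Python) =====
-- def preprocess_model1(allRows):
--     distinctWords = dict()
--     classes, inverseClasses = dict(), dict()
--     for row in allRows:
--         if len(row) != 0:
--             if row[0] not in distinctWords:
--                 distinctWords[row[0]] = len(distinctWords) + 1
--             if row[1] not in classes:
--                 classes[row[1]] = len(classes) + 1
--                 inverseClasses[len(classes)] = row[1]
--     return (distinctWords, classes, inverseClasses)
-- ===== SOURCE B (Python) =====
-- def preprocess_model1(allRows):
--     rows = [row for row in allRows if row]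
--     words = list(dict.fromkeys(row[0] for row in rows))
--     cls = list(dict.fromkeys(row[1] for row in rows))
--     distinctWords = {w: i for i, w in enumerate(words, 1)}
--     classes = {c: i for i, c in enumerate(cls, 1)}
--     inverseClasses = {i: c for i, c in enumerate(cls, 1)}
--     return (distinctWords, classes, inverseClasses)
-- ===== Notes on version B (the rewrite author's own statement) =====
-- stated objective: idiomatic
-- what changed: A interleaves membership tests and counter maintenance for three dicts in one pass; B first extracts the ordered distinct word/class sequences with dict.fromkeys and then assigns the 1-based indices (and the inverse map) afterwards by enumerate, so no membership test or running counter appears at all.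
import Mathlib
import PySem

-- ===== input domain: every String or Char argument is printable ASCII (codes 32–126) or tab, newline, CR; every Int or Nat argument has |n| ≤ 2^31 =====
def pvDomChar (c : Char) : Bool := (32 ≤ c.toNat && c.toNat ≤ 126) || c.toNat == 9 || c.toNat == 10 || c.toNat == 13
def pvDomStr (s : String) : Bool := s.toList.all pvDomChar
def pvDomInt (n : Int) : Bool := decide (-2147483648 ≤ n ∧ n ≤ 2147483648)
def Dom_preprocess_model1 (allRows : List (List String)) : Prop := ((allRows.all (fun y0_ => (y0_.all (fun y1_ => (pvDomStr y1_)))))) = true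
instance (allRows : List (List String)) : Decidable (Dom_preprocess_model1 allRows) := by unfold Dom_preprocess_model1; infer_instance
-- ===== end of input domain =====

-- B replaces A's interleaved membership-test-and-counter pass by dedupe-then-enumerate:
-- extract the ordered distinct word/class sequences first, assign indices afterwards (idiomatic; same cost).

-- ===== PORT A =====
-- one interleaved loop over rows updating (distinctWords, classes, inverseClasses)
def pvStepA (st : PySem.Dict String Int × PySem.Dict String Int × PySem.Dict Int String)
    (row : List String) : PySem.Dict String Int × PySem.Dict String Int × PySem.Dict Int String :=
  if row.length ≠ 0 then
    match PySem.List.pyGet? row 0, PySem.List.pyGet? row 1 with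
    | some w, some cl =>
      let d := if st.1.contains w then st.1 else st.1.insert w ((st.1.size : Int) + 1)
      if st.2.1.contains cl then (d, st.2.1, st.2.2)
      else
        let c' := st.2.1.insert cl ((st.2.1.size : Int) + 1)
        (d, c', st.2.2.insert ((c'.size : Int)) cl)
    | _, _ => st  -- unreachable inside Pre_ (Python raises IndexError on a length-1 row)
  else st

def preprocess_model1 (allRows : List (List String)) :
    (List (String × Int)) × (List (String × Int)) × (List (Int × String)) :=
  let st := allRows.foldl pvStepA (PySem.Dict.empty, PySem.Dict.empty, PySem.Dict.empty)
  (st.1.items, st.2.1.items, st.2.2.items)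

-- ===== PORT B =====
-- rows kept by Python truthiness; row[0]/row[1] via pyGet? (the .getD "" default is only
-- reached on length-1 rows, which Pre_ excludes because Python raises there)
def preprocess_model1_alt (allRows : List (List String)) :
    (List (String × Int)) × (List (String × Int)) × (List (Int × String)) :=
  let rows := allRows.filter (fun r => r ≠ [])
  let words := PySem.List.dedup (rows.map (fun r => (PySem.List.pyGet? r 0).getD ""))
  let cls := PySem.List.dedup (rows.map (fun r => (PySem.List.pyGet? r 1).getD ""))
  ((words.zipIdx 1).map (fun p => (p.1, (p.2 : Int))),
   (cls.zipIdx 1).map (fun p => (p.1, (p.2 : Int))),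
   (cls.zipIdx 1).map (fun p => ((p.2 : Int), p.1)))

-- ===== PRECONDITION & SPEC =====
-- Pre_ excludes inputs containing a row of length exactly 1: there Python A (and B) raise IndexError on row[1].
def Pre_preprocess_model1 (allRows : List (List String)) : Prop :=
  ∀ row ∈ allRows, row ≠ [] → 2 ≤ row.length
instance (allRows : List (List String)) : Decidable (Pre_preprocess_model1 allRows) := by
  unfold Pre_preprocess_model1; infer_instance

def pvWitness_preprocess_model1 : List (List String) := [["hello", "NN"], [], ["cat", "DT", "x"]]

def Spec_preprocess_model1 (allRows : List (List String))
    (out : (List (String × Int)) × (List (String × Int)) × (List (Int × String))) : Prop :=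
  out = preprocess_model1_alt allRows
instance (allRows : List (List String)) (out : (List (String × Int)) × (List (String × Int)) × (List (Int × String))) : Decidable (Spec_preprocess_model1 allRows out) := by unfold Spec_preprocess_model1; infer_instance

-- ===== CLAIM (what is proved, stated in full; the proofs are below) =====
def Claim_equal_preprocess_model1 : Prop := ∀ (allRows : List (List String)), Dom_preprocess_model1 allRows → Pre_preprocess_model1 allRows → Spec_preprocess_model1 allRows (preprocess_model1 allRows)

-- ===== LEMMAS AND PROOFS =====

-- the enumerations B derives from a distinct-element list
def pvEnumW (l : List String) : List (String × Int) := (l.zipIdx 1).map (fun p => (p.1, (p.2 : Int)))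
def pvEnumI (l : List String) : List (Int × String) := (l.zipIdx 1).map (fun p => ((p.2 : Int), p.1))

theorem pvEnumW_append (l : List String) (w : String) :
    pvEnumW (l ++ [w]) = pvEnumW l ++ [(w, (l.length : Int) + 1)] := by
  simp [pvEnumW, List.zipIdx_append]; ring

theorem pvEnumI_append (l : List String) (w : String) :
    pvEnumI (l ++ [w]) = pvEnumI l ++ [((l.length : Int) + 1, w)] := by
  simp [pvEnumI, List.zipIdx_append]; ring

theorem pvEnumW_keys (l : List String) : (pvEnumW l).map Prod.fst = l := by
  simp [pvEnumW, List.map_map, Function.comp_def, List.zipIdx_map_fst 1 l]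

theorem pvEnumI_key_le (l : List String) (k : Int) (hk : k ∈ (pvEnumI l).map Prod.fst) :
    k ≤ (l.length : Int) := by
  simp only [pvEnumI, List.map_map, List.mem_map, Function.comp] at hk
  obtain ⟨⟨a, i⟩, hmem, hke⟩ := hk
  obtain ⟨_, hlt, _⟩ := List.mem_zipIdx hmem
  simp at hke; omega

-- B's per-row dedup steps (what B's filtered-map dedup folds, re-expressed over allRows)
def pvGW (acc : List String) (r : List String) : List String :=
  if r ≠ [] then PySem.Set.add acc ((PySem.List.pyGet? r 0).getD "") else acc
def pvGC (acc : List String) (r : List String) : List String :=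
  if r ≠ [] then PySem.Set.add acc ((PySem.List.pyGet? r 1).getD "") else acc

theorem pvSize_eq (c : PySem.Dict String Int) (acc : List String)
    (hc : c.items = pvEnumW acc) : c.size = acc.length := by
  have := congrArg List.length (congrArg (List.map Prod.fst) hc)
  simpa [PySem.Dict.size, pvEnumW_keys] using this

theorem pvContains_eq (c : PySem.Dict String Int) (acc : List String) (x : String)
    (hc : c.items = pvEnumW acc) : c.contains x = decide (x ∈ acc) := by
  rw [PySem.Dict.contains_eq_decide_mem_keys]
  simp [PySem.Dict.keys, hc, pvEnumW_keys]

-- inserting a fresh class keeps the enumeration shape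
theorem pvInsertC (c : PySem.Dict String Int) (acc : List String) (cl : String)
    (hc : c.items = pvEnumW acc) (hcl : cl ∉ acc) :
    (c.insert cl ((c.size : Int) + 1)).items = pvEnumW (acc ++ [cl]) := by
  rw [PySem.Dict.items_insert_of_not_contains _ _ (by simp [pvContains_eq c acc cl hc, hcl]),
    hc, pvEnumW_append, pvSize_eq c acc hc]

theorem pvSize_insertC (c : PySem.Dict String Int) (acc : List String) (cl : String)
    (hc : c.items = pvEnumW acc) (hcl : cl ∉ acc) :
    (c.insert cl ((c.size : Int) + 1)).size = acc.length + 1 :=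
  by simpa using pvSize_eq _ (acc ++ [cl]) (pvInsertC c acc cl hc hcl)

theorem pvInsertI (c : PySem.Dict String Int) (inv : PySem.Dict Int String)
    (acc : List String) (cl : String) (hc : c.items = pvEnumW acc)
    (hi : inv.items = pvEnumI acc) (hcl : cl ∉ acc) :
    (inv.insert (((c.insert cl ((c.size : Int) + 1)).size : Int)) cl).items
      = pvEnumI (acc ++ [cl]) := by
  have hfresh : inv.contains (((c.insert cl ((c.size : Int) + 1)).size : Int)) = false := by
    rw [PySem.Dict.contains_eq_decide_mem_keys, decide_eq_false_iff_not]
    intro hmem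
    have hle := pvEnumI_key_le acc _ (by simpa [PySem.Dict.keys, hi] using hmem)
    rw [pvSize_insertC c acc cl hc hcl] at hle
    push_cast at hle; omega
  rw [PySem.Dict.items_insert_of_not_contains _ cl hfresh, hi, pvEnumI_append,
    pvSize_insertC c acc cl hc hcl]
  push_cast; ring_nf

-- invariant: A's three dicts mirror B's two dedup accumulators
theorem pvMain (rows : List (List String)) (d c : PySem.Dict String Int)
    (inv : PySem.Dict Int String) (wacc cacc : List String)
    (hpre : ∀ row ∈ rows, row ≠ [] → 2 ≤ row.length)
    (hd : d.items = pvEnumW wacc) (hc : c.items = pvEnumW cacc) (hi : inv.items = pvEnumI cacc) :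
    (rows.foldl pvStepA (d, c, inv)).1.items = pvEnumW (rows.foldl pvGW wacc) ∧
    (rows.foldl pvStepA (d, c, inv)).2.1.items = pvEnumW (rows.foldl pvGC cacc) ∧
    (rows.foldl pvStepA (d, c, inv)).2.2.items = pvEnumI (rows.foldl pvGC cacc) := by
  induction rows generalizing d c inv wacc cacc with
  | nil => exact ⟨hd, hc, hi⟩
  | cons row rows ih =>
    have hpre' : ∀ r ∈ rows, r ≠ [] → 2 ≤ r.length := fun r hr => hpre r (List.mem_cons_of_mem _ hr)
    match row with
    | [] =>
      simp only [List.foldl, pvStepA, pvGW, pvGC, List.length_nil, ne_eq, not_true_eq_false,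
        if_false]
      exact ih d c inv wacc cacc hpre' hd hc hi
    | [w] =>
      exact absurd (hpre [w] (List.mem_cons_self) (by simp)) (by simp)
    | w :: cl :: t =>
      have hnn : (0:Int) ≤ (t.length : Int) + 1 := by positivity
      have hg0 : PySem.List.pyGet? (w :: cl :: t) 0 = some w := by
        simp [PySem.List.pyGet?, PySem.List.pyIdx?, hnn]
      have hg1 : PySem.List.pyGet? (w :: cl :: t) 1 = some cl := by
        simp [PySem.List.pyGet?, PySem.List.pyIdx?]
      simp only [List.foldl, pvStepA, pvGW, pvGC, hg0, hg1, Option.getD_some,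
        List.length_cons, if_pos (by omega : (t.length + 1 + 1 : Nat) ≠ 0),
        if_pos (by simp : (w :: cl :: t) ≠ []), ne_eq, PySem.Set.add, PySem.Set.contains,
        List.contains_eq_mem, pvContains_eq d wacc w hd, pvContains_eq c cacc cl hc]
      by_cases hw : w ∈ wacc <;> by_cases hcl : cl ∈ cacc <;>
        simp only [hw, hcl, decide_true, decide_false, if_pos, Bool.false_eq_true, if_false]
      · exact ih d c inv wacc cacc hpre' hd hc hi
      · exact ih d _ _ wacc (cacc ++ [cl]) hpre' hd (pvInsertC c cacc cl hc hcl)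
          (pvInsertI c inv cacc cl hc hi hcl)
      · exact ih _ c inv (wacc ++ [w]) cacc hpre' (pvInsertC d wacc w hd hw) hc hi
      · exact ih _ _ _ (wacc ++ [w]) (cacc ++ [cl]) hpre' (pvInsertC d wacc w hd hw)
          (pvInsertC c cacc cl hc hcl) (pvInsertI c inv cacc cl hc hi hcl)

-- B's dedup-of-filtered-map folds are the pvGW/pvGC folds over allRows
theorem pvDedupW (allRows : List (List String)) :
    PySem.List.dedup ((allRows.filter (fun r => r ≠ [])).map
        (fun r => (PySem.List.pyGet? r 0).getD "")) = allRows.foldl pvGW [] := by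
  simp only [PySem.List.dedup, PySem.Set.ofList, List.foldl_map, List.foldl_filter]
  have : (fun (x : List String) (y : List String) =>
      if (fun r => decide (r ≠ [])) y = true then PySem.Set.add x ((PySem.List.pyGet? y 0).getD "") else x)
      = pvGW := by
    funext x y; simp [pvGW]
  rw [this]; rfl

theorem pvDedupC (allRows : List (List String)) :
    PySem.List.dedup ((allRows.filter (fun r => r ≠ [])).map
        (fun r => (PySem.List.pyGet? r 1).getD "")) = allRows.foldl pvGC [] := by
  simp only [PySem.List.dedup, PySem.Set.ofList, List.foldl_map, List.foldl_filter]
  have : (fun (x : List String) (y : List String) =>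
      if (fun r => decide (r ≠ [])) y = true then PySem.Set.add x ((PySem.List.pyGet? y 1).getD "") else x)
      = pvGC := by
    funext x y; simp [pvGC]
  rw [this]; rfl

-- ===== VERDICT (by name: the statement is the Claim_ definition above) =====
theorem preprocess_model1_spec : Claim_equal_preprocess_model1 := by
  intro allRows _hdom hpre
  unfold Spec_preprocess_model1 preprocess_model1 preprocess_model1_alt
  obtain ⟨h1, h2, h3⟩ := pvMain allRows PySem.Dict.empty PySem.Dict.empty PySem.Dict.empty [] []
    hpre (by simp [PySem.Dict.empty, pvEnumW]) (by simp [PySem.Dict.empty, pvEnumW])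
    (by simp [PySem.Dict.empty, pvEnumI])
  simp only [pvDedupW, pvDedupC, h1, h2, h3, pvEnumW, pvEnumI]
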